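-- pv_equiv track=rewrite | github.com/Tillsunset/VSCodeProjects | Python/sorts/stalinSort.py | weave
-- ===== SOURCE A (Python) =====
-- def merges(x, y):
-- 	tempArray = []
--
-- 	while len(x) > 0 and len(y) > 0:
-- 		if x[0] < y[0]:
-- 			tempArray.append(x.pop(0))
-- 		elif x[0] > y[0]:
-- 			tempArray.append(y.pop(0))
-- 		else:
-- 			tempArray.append(x.pop(0))
-- 			tempArray.append(y.pop(0))
--
-- 	if len(x) > 0:
-- 		tempArray = tempArray + x
-- 	elif len(y) > 0:
-- 		tempArray = tempArray + y
--
-- 	return tempArray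
--
-- def weave(x):
-- 	i = 0
--
-- 	while len(x) > 1:
-- 		while i < len(x) - 1:
-- 			x[i] = merges(x[i], x.pop(i + 1))
-- 			i+=1
-- 		i = 0
--
-- 	return x
-- ===== SOURCE B (Python) =====
-- def _merge(a, b):
--     # three-way merge by read indices; ties emit the element from a then the one from b
--     out = []
--     i = j = 0
--     while i < len(a) and j < len(b):
--         if a[i] < b[j]:
--             out.append(a[i]); i += 1
--         elif a[i] > b[j]:
--             out.append(b[j]); j += 1
--         else:
--             out.append(a[i]); out.append(b[j]); i += 1; j += 1
--     out.extend(a[i:])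
--     out.extend(b[j:])
--     return out
--
-- def weave(x):
--     row = x
--     while len(row) > 1:
--         nxt = []
--         k = 0
--         while k + 1 < len(row):
--             nxt.append(_merge(row[k], row[k + 1]))
--             k += 2
--         if k < len(row):
--             nxt.append(row[k])
--         row = nxt
--     x[:] = row
--     return x
-- ===== Notes on version B (the rewrite author's own statement) =====
-- stated objective: faster
-- what changed: B keeps the same pairwise merge tournament but replaces A's destructive pop(0)/pop(i+1) mutation with non-mutating two-pointer merges and a stride-2 index pass, making each merge linear instead of quadratic.
import Mathlib
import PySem

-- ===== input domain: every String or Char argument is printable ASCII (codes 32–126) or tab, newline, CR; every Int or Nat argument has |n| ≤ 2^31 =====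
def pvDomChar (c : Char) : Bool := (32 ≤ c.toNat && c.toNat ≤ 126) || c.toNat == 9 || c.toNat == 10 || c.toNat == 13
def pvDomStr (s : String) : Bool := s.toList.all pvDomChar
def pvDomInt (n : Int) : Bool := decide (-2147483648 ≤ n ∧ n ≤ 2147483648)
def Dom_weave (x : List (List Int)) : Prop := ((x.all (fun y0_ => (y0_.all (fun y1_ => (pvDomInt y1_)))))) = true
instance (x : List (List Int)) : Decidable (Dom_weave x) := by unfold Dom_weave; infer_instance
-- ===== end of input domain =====

-- B keeps A's pairwise merge tournament but drops all pop()-based mutation: two-pointer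
-- merges and a stride-2 index pass (objective: faster, no quadratic pop(0) shifting).
-- A mutates its argument in place (pop / item assignment); the equivalence proved here is
-- about the RETURN value (B performs the analogous x[:] = row mutation in Python).
-- Each while loop is ported with a structural fuel parameter; the fuel passed at each
-- call site bounds the loop's iteration count, so the fuel-0 arm is never reached.

-- ===== PORT A =====
-- merges: while loop with temp accumulator; x.pop(0)/y.pop(0) = recursing on the tails
def pvMergesLoop : Nat → List Int → List Int → List Int → List Int
  | n + 1, temp, a :: xs, b :: ys =>
    if a < b then pvMergesLoop n (temp ++ [a]) xs (b :: ys)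
    else if a > b then pvMergesLoop n (temp ++ [b]) (a :: xs) ys
    else pvMergesLoop n (temp ++ [a, b]) xs ys
  | _, temp, x, y =>                      -- loop exit (the fuel-0 arm is unreachable)
    if x.length > 0 then temp ++ x
    else if y.length > 0 then temp ++ y
    else temp

def pvMerges (x y : List Int) : List Int := pvMergesLoop (x.length + y.length) [] x y

-- inner while: x[i] = merges(x[i], x.pop(i+1)); i += 1
def pvInner : Nat → Nat → List (List Int) → List (List Int)
  | n + 1, i, x =>
    if h : i < x.length - 1 then
      pvInner n (i + 1)
        (x.take i ++ [pvMerges (x[i]'(by omega)) (x[i+1]'(by omega))] ++ x.drop (i + 2))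
    else x
  | 0, _, x => x

-- outer while: while len(x) > 1
def pvWeaveLoop : Nat → List (List Int) → List (List Int)
  | n + 1, x => if 1 < x.length then pvWeaveLoop n (pvInner x.length 0 x) else x
  | 0, x => x

def weave (x : List (List Int)) : List (List Int) := pvWeaveLoop x.length x

-- ===== PORT B =====
-- _merge: two read indices i j into fixed lists, out accumulator; out.extend(a[i:]) etc.
def pvMergeLoop : Nat → List Int → List Int → Nat → Nat → List Int → List Int
  | n + 1, a, b, i, j, out =>
    if h : i < a.length ∧ j < b.length then
      if (a[i]'h.1) < (b[j]'h.2) then pvMergeLoop n a b (i + 1) j (out ++ [a[i]'h.1])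
      else if (a[i]'h.1) > (b[j]'h.2) then pvMergeLoop n a b i (j + 1) (out ++ [b[j]'h.2])
      else pvMergeLoop n a b (i + 1) (j + 1) (out ++ [a[i]'h.1, b[j]'h.2])
    else out ++ a.drop i ++ b.drop j
  | 0, a, b, i, j, out => out ++ a.drop i ++ b.drop j   -- unreachable for the fuel used

def pvMergeB (a b : List Int) : List Int := pvMergeLoop (a.length + b.length) a b 0 0 []

-- inner while: while k + 1 < len(row): nxt.append(_merge(row[k], row[k+1])); k += 2
def pvNextLoop : Nat → List (List Int) → Nat → List (List Int) → List (List Int)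
  | n + 1, row, k, nxt =>
    if h : k + 1 < row.length then
      pvNextLoop n row (k + 2) (nxt ++ [pvMergeB (row[k]'(by omega)) (row[k+1]'h)])
    else if hk : k < row.length then nxt ++ [row[k]'hk] else nxt
  | 0, _, _, nxt => nxt                                 -- unreachable for the fuel used

-- outer while: while len(row) > 1: row = nxt
def pvRowLoop : Nat → List (List Int) → List (List Int)
  | n + 1, row =>
    if 1 < row.length then pvRowLoop n (pvNextLoop row.length row 0 []) else row
  | 0, row => row

def weave_alt (x : List (List Int)) : List (List Int) := pvRowLoop x.length x

-- ===== PRECONDITION & SPEC =====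
def Spec_weave (x : List (List Int)) (out : List (List Int)) : Prop := out = weave_alt x
instance (x : List (List Int)) (out : List (List Int)) : Decidable (Spec_weave x out) := by unfold Spec_weave; infer_instance

-- ===== CLAIM (what is proved, stated in full; the proofs are below) =====
def Claim_equal_weave : Prop := ∀ (x : List (List Int)), Dom_weave x → Spec_weave x (weave x)

-- ===== LEMMAS AND PROOFS =====

-- one pairing pass, abstractly
def pvPairs : List (List Int) → List (List Int)
  | a :: b :: rest => pvMerges a b :: pvPairs rest
  | r => r

theorem pvPairs_short (r : List (List Int)) (h : r.length ≤ 1) : pvPairs r = r := by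
  match r with
  | [] => rfl
  | [a] => rfl
  | a :: b :: rest => simp at h

theorem pvPairs_le (r : List (List Int)) : (pvPairs r).length ≤ r.length := by
  fun_induction pvPairs r with
  | case1 a b rest ih => simp; omega
  | case2 r _ => exact le_rfl

theorem pvPairs_lt (r : List (List Int)) (h : 1 < r.length) :
    (pvPairs r).length < r.length := by
  match r with
  | a :: b :: rest => have := pvPairs_le rest; simp [pvPairs]; omega
  | [] => simp at h
  | [a] => simp at h

theorem pvMergesLoop_exit (n : Nat) (temp x y : List Int) (h : x = [] ∨ y = []) :
    pvMergesLoop n temp x y = temp ++ x ++ y := by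
  rcases h with h | h <;> subst h <;> cases n <;>
    [cases y; cases y; cases x; cases x] <;> rw [pvMergesLoop] <;> simp

theorem pvMergeLoop_eq (n : Nat) (a b : List Int) (i j : Nat) (out : List Int)
    (hn : (a.length - i) + (b.length - j) ≤ n) :
    pvMergeLoop n a b i j out = pvMergesLoop n out (a.drop i) (b.drop j) := by
  induction n generalizing i j out with
  | zero =>
    have hi : a.drop i = [] := by simp [List.drop_eq_nil_iff]; omega
    have hj : b.drop j = [] := by simp [List.drop_eq_nil_iff]; omega
    rw [pvMergeLoop, pvMergesLoop_exit _ _ _ _ (Or.inl hi), hi, hj]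
  | succ n ih =>
    rw [pvMergeLoop]
    by_cases h : i < a.length ∧ j < b.length
    · simp only [h, dif_pos]
      rw [List.drop_eq_getElem_cons h.1, List.drop_eq_getElem_cons h.2, pvMergesLoop]
      by_cases h1 : (a[i]'h.1) < (b[j]'h.2)
      · simp only [h1, if_pos]
        rw [← List.drop_eq_getElem_cons h.2]
        exact ih _ _ _ (by omega)
      · by_cases h2 : (a[i]'h.1) > (b[j]'h.2)
        · simp only [h1, h2, if_pos, if_false]
          rw [← List.drop_eq_getElem_cons h.1]
          exact ih _ _ _ (by omega)
        · simp only [h1, h2, if_false]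
          exact ih _ _ _ (by omega)
    · simp only [h, dif_neg, not_false_iff]
      have hxy : a.drop i = [] ∨ b.drop j = [] := by
        by_cases hi : i < a.length
        · right
          have : ¬ j < b.length := fun hj => h ⟨hi, hj⟩
          simp [List.drop_eq_nil_iff]; omega
        · left; simp [List.drop_eq_nil_iff]; omega
      rw [pvMergesLoop_exit _ _ _ _ hxy]

theorem pvMergeB_eq (a b : List Int) : pvMergeB a b = pvMerges a b := by
  unfold pvMergeB pvMerges
  simpa using pvMergeLoop_eq (a.length + b.length) a b 0 0 [] (by omega)

theorem pvNextLoop_eq (n : Nat) (row : List (List Int)) (k : Nat)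
    (nxt : List (List Int)) (hn : row.length - k ≤ n) :
    pvNextLoop n row k nxt = nxt ++ pvPairs (row.drop k) := by
  induction n generalizing k nxt with
  | zero =>
    have : row.drop k = [] := by simp [List.drop_eq_nil_iff]; omega
    simp [pvNextLoop, this, pvPairs]
  | succ n ih =>
    rw [pvNextLoop]
    by_cases h : k + 1 < row.length
    · simp only [h, dif_pos]
      rw [List.drop_eq_getElem_cons (by omega : k < row.length),
          List.drop_eq_getElem_cons h, pvPairs]
      rw [ih _ _ (by omega), pvMergeB_eq]
      simp
    · simp only [h, dif_neg, not_false_iff]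
      by_cases hk : k < row.length
      · simp only [hk, dif_pos]
        rw [List.drop_eq_getElem_cons hk]
        have : row.drop (k + 1) = [] := by simp [List.drop_eq_nil_iff]; omega
        rw [this]
        rfl
      · simp only [hk, dif_neg, not_false_iff]
        have : row.drop k = [] := by simp [List.drop_eq_nil_iff]; omega
        simp [this, pvPairs]

theorem pvInner_eq (n i : Nat) (x : List (List Int)) (hn : x.length - 1 - i ≤ n) :
    pvInner n i x = x.take i ++ pvPairs (x.drop i) := by
  induction n generalizing i x with
  | zero =>
    have h1 : (x.drop i).length ≤ 1 := by simp; omega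
    rw [pvInner, pvPairs_short _ h1]
    simp
  | succ n ih =>
    rw [pvInner]
    by_cases h : i < x.length - 1
    · simp only [h, dif_pos]
      have hi : i < x.length := by omega
      have hi1 : i + 1 < x.length := by omega
      rw [ih _ _ (by simp; omega)]
      rw [List.drop_eq_getElem_cons hi, List.drop_eq_getElem_cons hi1, pvPairs]
      have hlen : (x.take i).length = i := by simp; omega
      rw [show x.take i ++ [pvMerges (x[i]'(by omega)) (x[i+1]'(by omega))] ++ x.drop (i + 2)
          = x.take i ++ ([pvMerges (x[i]'(by omega)) (x[i+1]'(by omega))] ++ x.drop (i + 2)) by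
        simp]
      rw [List.take_append, List.drop_append, hlen]
      have t1 : List.take (i + 1) (List.take i x) = List.take i x :=
        List.take_of_length_le (by simp)
      have t2 : List.drop (i + 1) (List.take i x) = [] :=
        List.drop_eq_nil_of_le (by simp)
      rw [t1, t2]
      simp [show i + 1 + 1 = i + 2 from rfl]
    · simp only [h, dif_neg, not_false_iff]
      have h1 : (x.drop i).length ≤ 1 := by simp; omega
      rw [pvPairs_short _ h1]
      simp

theorem pvLoop_eq (n m : Nat) (x : List (List Int))
    (hn : x.length ≤ n) (hm : x.length ≤ m) : pvWeaveLoop n x = pvRowLoop m x := by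
  induction n generalizing m x with
  | zero =>
    have : x = [] := by rw [← List.length_eq_zero_iff]; omega
    subst this
    cases m <;> simp [pvWeaveLoop, pvRowLoop]
  | succ n ih =>
    by_cases h : 1 < x.length
    · obtain ⟨m', rfl⟩ : ∃ m', m = m' + 1 := ⟨m - 1, by omega⟩
      rw [pvWeaveLoop, pvRowLoop]
      simp only [h, if_pos]
      rw [pvInner_eq _ _ _ (by omega), pvNextLoop_eq _ _ _ _ (by omega)]
      simp only [List.take_zero, List.drop_zero, List.nil_append]
      have := pvPairs_lt x h
      exact ih _ _ (by omega) (by omega)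
    · cases m <;> rw [pvWeaveLoop, pvRowLoop] <;> simp [h]

-- ===== VERDICT (by name: the statement is the Claim_ definition above) =====
theorem weave_spec : Claim_equal_weave := by
  intro x _
  unfold Spec_weave weave weave_alt
  exact pvLoop_eq _ _ x le_rfl le_rfl
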